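-- pv_equiv track=rewrite | github.com/Real-Luxof/LuxOS | Apps/api.py | scale_2dlist
-- ===== SOURCE A (Python) =====
-- def scale_2dlist(data: list, extendby_Y: int = 2, extendby_X: int = 2) -> list:
--     """Lmao bing chat wrote 99.8% of this
--     this function just turns up the resolution of a 2D array
--     example:
--     data = [
--         [1, 2, 3],
--         [4, 5, 6],
--         [7, 8, 9]
--     ]
--     if [extendby_Y] and [extendby_X] are set to 2, that will become
--     data = [
--         [1, 1, 2, 2, 3, 3],
--         [1, 1, 2, 2, 3, 3],
--         [4, 4, 5, 5, 6, 6],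
--         [4, 4, 5, 5, 6, 6],
--         [7, 7, 8, 8, 9, 9],
--         [7, 7, 8, 8, 9, 9]
--     ]
--
--     Args:
--         data (list): 2D Array.
--         extendby (int, optional): . Defaults to 1.
--
--     Returns:
--         list: the resulting 2D Array. if [extendby] is set to 1, it somehow returns nothing.
--     """
--     result = []
--     for row in data:
--         for _ in range(extendby_Y):
--             new_row = [
--                 item for item in row for _ in range(extendby_X)
--             ]  # Duplicate each item in the row
--             result.append(new_row)  # Duplicate each row
--             # weird method of adding new lists cuz python stores it weird if i don't do this
--     return result
-- ===== SOURCE B (Python) =====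
-- def scale_2dlist(data: list, extendby_Y: int = 2, extendby_X: int = 2) -> list:
--     # Two-pass decomposition: first widen every row once (columns), then
--     # emit extendby_Y fresh copies of each widened row (rows).
--     if extendby_Y <= 0:
--         return []
--     wide = [sum(([item] * extendby_X for item in row), []) for row in data]
--     result = []
--     for w in wide:
--         result.extend(list(w) for _ in range(extendby_Y))
--     return result
-- ===== Notes on version B (the rewrite author's own statement) =====
-- stated objective: alternative
-- what changed: A recomputes the widened row inside the per-row repetition loop; B first widens every row once in a separate pass (building each wide row by concatenating [item]*extendby_X blocks) and then, in a second pass of different shape, extends the result with extendby_Y copies of each widened row.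
import Mathlib
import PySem

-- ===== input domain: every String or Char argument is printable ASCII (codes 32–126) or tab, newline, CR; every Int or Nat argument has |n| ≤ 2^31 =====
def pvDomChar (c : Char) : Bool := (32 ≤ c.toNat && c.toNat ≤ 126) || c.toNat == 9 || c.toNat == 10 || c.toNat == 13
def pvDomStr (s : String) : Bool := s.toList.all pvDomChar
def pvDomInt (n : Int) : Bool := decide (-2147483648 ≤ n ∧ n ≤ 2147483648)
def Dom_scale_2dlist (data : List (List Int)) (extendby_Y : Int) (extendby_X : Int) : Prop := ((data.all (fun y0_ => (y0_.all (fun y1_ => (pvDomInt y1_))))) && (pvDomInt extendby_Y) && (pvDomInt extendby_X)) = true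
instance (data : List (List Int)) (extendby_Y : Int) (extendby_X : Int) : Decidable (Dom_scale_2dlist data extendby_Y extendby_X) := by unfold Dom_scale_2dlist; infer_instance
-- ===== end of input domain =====

-- B replaces A's per-repetition recomputation of the widened row by two separate passes
-- (widen each row once, then emit extendby_Y copies of each widened row); same cost class.
-- ===== PORT A =====
def scale_2dlist (data : List (List Int)) (extendby_Y : Int) (extendby_X : Int) : List (List Int) :=
  data.foldl (fun result row =>
    (PySem.List.pyRange 0 extendby_Y 1).foldl (fun result _ =>
      result ++ [row.flatMap (fun item => (PySem.List.pyRange 0 extendby_X 1).map (fun _ => item))])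
      result) []

-- ===== PORT B =====
-- sum(([item] * extendby_X for item in row), [])
def wideRow (extendby_X : Int) (row : List Int) : List Int :=
  row.foldl (fun acc item => acc ++ List.replicate extendby_X.toNat item) []

def scale_2dlist_alt (data : List (List Int)) (extendby_Y : Int) (extendby_X : Int) : List (List Int) :=
  if extendby_Y ≤ 0 then [] else
  let wide := data.map (wideRow extendby_X)
  wide.foldl (fun result w => result ++ (PySem.List.pyRange 0 extendby_Y 1).map (fun _ => w)) []

-- ===== PRECONDITION & SPEC =====
def Spec_scale_2dlist (data : List (List Int)) (extendby_Y : Int) (extendby_X : Int) (out : List (List Int)) : Prop := out = scale_2dlist_alt data extendby_Y extendby_X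
instance (data : List (List Int)) (extendby_Y : Int) (extendby_X : Int) (out : List (List Int)) : Decidable (Spec_scale_2dlist data extendby_Y extendby_X out) := by unfold Spec_scale_2dlist; infer_instance

-- ===== CLAIM (what is proved, stated in full; the proofs are below) =====
def Claim_equal_scale_2dlist : Prop := ∀ (data : List (List Int)) (extendby_Y : Int) (extendby_X : Int), Dom_scale_2dlist data extendby_Y extendby_X → Spec_scale_2dlist data extendby_Y extendby_X (scale_2dlist data extendby_Y extendby_X)

-- ===== LEMMAS AND PROOFS =====

-- ===== VERDICT (by name: the statement is the Claim_ definition above) =====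

lemma wide_eq (eX : Int) (row : List Int) :
    row.flatMap (fun item => (PySem.List.pyRange 0 eX 1).map (fun _ => item)) = wideRow eX row := by
  have h : ∀ item : Int, (PySem.List.pyRange 0 eX 1).map (fun _ => item)
      = List.replicate eX.toNat item := by
    intro item
    rw [List.map_const', PySem.List.length_pyRange_one]
    simp
  simp only [h, wideRow]
  have gen : ∀ (r : List Int) (acc : List Int),
      acc ++ r.flatMap (fun item => List.replicate eX.toNat item)
      = r.foldl (fun acc item => acc ++ List.replicate eX.toNat item) acc := by
    intro r
    induction r with
    | nil => simp
    | cons y ys ih => intro acc; simp [ih]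
  simpa using gen row []

lemma foldA (eY eX : Int) (data : List (List Int)) (acc : List (List Int)) :
    data.foldl (fun result row =>
      (PySem.List.pyRange 0 eY 1).foldl (fun result _ =>
        result ++ [row.flatMap (fun item => (PySem.List.pyRange 0 eX 1).map (fun _ => item))])
        result) acc
    = (data.map (wideRow eX)).foldl
        (fun result w => result ++ (PySem.List.pyRange 0 eY 1).map (fun _ => w)) acc := by
  induction data generalizing acc with
  | nil => rfl
  | cons row rest ih =>
      simp only [List.foldl_cons, List.map_cons]
      rw [PySem.List.foldl_append_singleton_eq_map, wide_eq, ih]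

theorem scale_2dlist_spec : Claim_equal_scale_2dlist := by
  intro data eY eX _
  unfold Spec_scale_2dlist scale_2dlist scale_2dlist_alt
  rw [foldA eY eX data []]
  by_cases h : eY ≤ 0
  · simp only [h, if_true]
    induction data.map (wideRow eX) with
    | nil => rfl
    | cons w ws ih => simp [PySem.List.pyRange_one_eq_nil h, ih]
  · simp [h]
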